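-- pv_equiv track=rewrite | github.com/buybnb/treeless | Sample Code.py | cb
-- ===== SOURCE A (Python) =====
-- def cb(idx,matrix):
--     for i in range(len(idx)):
--         for j in range(len(idx)):
--             if i!=j:
--                 matrix[idx[i],idx[j]]+=1
--             else:
--                 matrix[idx[i], idx[j]]=1
--     return matrix
-- ===== SOURCE B (Python) =====
-- def cb(idx, matrix):
--     # Count-then-product: mutates `matrix` in place like the original.
--     cnt = {}
--     for v in idx:
--         cnt[v] = cnt.get(v, 0) + 1
--     for r, nr in cnt.items():
--         for c, nc in cnt.items():
--             if r != c:
--                 matrix[r, c] += nr * nc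
--     for v in idx:
--         matrix[v, v] = 1
--     return matrix
-- ===== Notes on version B (the rewrite author's own statement) =====
-- stated objective: faster
-- what changed: Replaces the O(n^2) scan over all index pairs with a frequency dictionary built in one pass: each ordered pair of distinct values (r,c) gets cnt[r]*cnt[c] added to matrix[r,c] once, and diagonals are set to 1 in a final pass (the original's last write to each diagonal cell is always the self-pair set, so it always ends at 1).
import Mathlib
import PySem

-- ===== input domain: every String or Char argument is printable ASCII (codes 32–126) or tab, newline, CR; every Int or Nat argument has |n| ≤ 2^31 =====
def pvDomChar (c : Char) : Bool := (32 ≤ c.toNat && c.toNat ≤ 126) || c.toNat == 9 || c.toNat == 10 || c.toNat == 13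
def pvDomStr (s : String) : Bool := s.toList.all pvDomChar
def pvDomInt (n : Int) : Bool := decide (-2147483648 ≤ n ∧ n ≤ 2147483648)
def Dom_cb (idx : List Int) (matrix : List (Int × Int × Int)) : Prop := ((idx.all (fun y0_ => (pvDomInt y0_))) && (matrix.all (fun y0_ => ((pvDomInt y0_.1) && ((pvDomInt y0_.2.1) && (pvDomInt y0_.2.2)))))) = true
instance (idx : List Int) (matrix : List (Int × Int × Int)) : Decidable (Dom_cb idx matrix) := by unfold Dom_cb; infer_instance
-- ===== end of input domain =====

-- B replaces A's O(n^2) pair scan by a value-frequency dictionary (one add of cnt[r]*cnt[c] per ordered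
-- pair of distinct values, then diagonals set to 1); both mutate `matrix` in place in Python — the
-- equivalence proved here is about the returned dict (which is that same object).

-- ===== PORT A =====
-- the dict matrix : dict[(int,int), int] is stored as flat triples (r, c, v); first match is the binding
def dGet? : List (Int × Int × Int) → Int → Int → Option Int
  | [], _, _ => none
  | (a, b, v) :: t, r, c => if a = r ∧ b = c then some v else dGet? t r c

def dSet : List (Int × Int × Int) → Int → Int → Int → List (Int × Int × Int)
  | [], r, c, v => [(r, c, v)]
  | (a, b, w) :: t, r, c, v => if a = r ∧ b = c then (a, b, v) :: t else (a, b, w) :: dSet t r c v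

def cb (idx : List Int) (matrix : List (Int × Int × Int)) : List (Int × Int × Int) :=
  (PySem.List.pyRange 0 (idx.length : Int) 1).foldl (fun m i =>
    (PySem.List.pyRange 0 (idx.length : Int) 1).foldl (fun m j =>
      if i ≠ j then
        -- matrix[idx[i], idx[j]] += 1 ; a KeyError (dGet? = none) is excluded by Pre_cb
        dSet m (PySem.List.pyGetD idx i 0) (PySem.List.pyGetD idx j 0)
          ((dGet? m (PySem.List.pyGetD idx i 0) (PySem.List.pyGetD idx j 0)).getD 0 + 1)
      else
        dSet m (PySem.List.pyGetD idx i 0) (PySem.List.pyGetD idx j 0) 1) m) matrix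

-- ===== PORT B =====
def cb_alt (idx : List Int) (matrix : List (Int × Int × Int)) : List (Int × Int × Int) :=
  let cnt : PySem.Dict Int Int :=
    idx.foldl (fun d v => d.insert v (d.getD v 0 + 1)) PySem.Dict.empty
  let m1 := cnt.items.foldl (fun m rn =>
    cnt.items.foldl (fun m cn =>
      if rn.1 ≠ cn.1 then
        dSet m rn.1 cn.1 ((dGet? m rn.1 cn.1).getD 0 + rn.2 * cn.2)
      else m) m) matrix
  idx.foldl (fun m v => dSet m v v 1) m1

-- ===== PRECONDITION & SPEC =====
-- Pre_cb is exactly A's normal-return domain: Python A raises KeyError as soon as matrix[idx[i], idx[j]] += 1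
-- hits a pair of DISTINCT values that is not yet a key (diagonal keys are always created by the i = j branch first).
def Pre_cb (idx : List Int) (matrix : List (Int × Int × Int)) : Prop :=
  ∀ a ∈ idx, ∀ b ∈ idx, a ≠ b → (a, b) ∈ matrix.map (fun e => (e.1, e.2.1))
instance (idx : List Int) (matrix : List (Int × Int × Int)) : Decidable (Pre_cb idx matrix) := by
  unfold Pre_cb; infer_instance

def pvWitness_cb : List Int × (List (Int × Int × Int)) :=
  ([1, 1, 2], [(1, 2, 0), (2, 1, 5), (7, 7, 3)])

def Spec_cb (idx : List Int) (matrix : List (Int × Int × Int)) (out : List (Int × Int × Int)) : Prop := out = cb_alt idx matrix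
instance (idx : List Int) (matrix : List (Int × Int × Int)) (out : List (Int × Int × Int)) : Decidable (Spec_cb idx matrix out) := by unfold Spec_cb; infer_instance

-- ===== CLAIM (what is proved, stated in full; the proofs are below) =====
def Claim_equal_cb : Prop := ∀ (idx : List Int) (matrix : List (Int × Int × Int)), Dom_cb idx matrix → Pre_cb idx matrix → Spec_cb idx matrix (cb idx matrix)

-- ===== LEMMAS AND PROOFS =====

-- A single dict-mutating operation: add n to a cell (creating it from 0), or set a cell.
inductive POp where
  | add : Int → Int → Int → POp
  | set : Int → Int → Int → POp
deriving DecidableEq, Repr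

def POp.key : POp → Int × Int
  | .add a b _ => (a, b)
  | .set a b _ => (a, b)

def POp.ival : POp → Int
  | .add _ _ n => n
  | .set _ _ w => w

def POp.app (m : List (Int × Int × Int)) : POp → List (Int × Int × Int)
  | .add a b n => dSet m a b ((dGet? m a b).getD 0 + n)
  | .set a b w => dSet m a b w

def pApply (ops : List POp) (m : List (Int × Int × Int)) : List (Int × Int × Int) :=
  ops.foldl POp.app m

def opsFor (k : Int × Int) (ops : List POp) : List POp :=
  ops.filter (fun o => decide (o.key = k))

def evalV (v : Int) : List POp → Int
  | [] => v
  | .add _ _ n :: t => evalV (v + n) t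
  | .set _ _ w :: t => evalV w t

def keysOf (m : List (Int × Int × Int)) : List (Int × Int) := m.map (fun e => (e.1, e.2.1))

-- first occurrence of each key in m, not yet in `seen`, gets its value pushed through opsFor
def updOcc (ops : List POp) : List (Int × Int) → List (Int × Int × Int) → List (Int × Int × Int)
  | _, [] => []
  | seen, (a, b, v) :: t =>
    if (a, b) ∈ seen then (a, b, v) :: updOcc ops seen t
    else (a, b, evalV v (opsFor (a, b) ops)) :: updOcc ops ((a, b) :: seen) t

-- keys of the op stream not in ks, first occurrences in order
def newKeys : List (Int × Int) → List (Int × Int) → List (Int × Int)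
  | _, [] => []
  | ks, k :: t => if k ∈ ks then newKeys ks t else k :: newKeys (k :: ks) t

def applyChar (ops : List POp) (m : List (Int × Int × Int)) : List (Int × Int × Int) :=
  updOcc ops [] m ++ (newKeys (keysOf m) (ops.map POp.key)).map (fun k => (k.1, k.2, evalV 0 (opsFor k ops)))


-- ---- basic dict lemmas ----

theorem keysOf_cons (a b v : Int) (t : List (Int × Int × Int)) :
    keysOf ((a, b, v) :: t) = (a, b) :: keysOf t := rfl

theorem keysOf_append (m₁ m₂ : List (Int × Int × Int)) :
    keysOf (m₁ ++ m₂) = keysOf m₁ ++ keysOf m₂ := by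
  simp [keysOf]

theorem dGet?_eq_none {m : List (Int × Int × Int)} {r c : Int}
    (h : (r, c) ∉ keysOf m) : dGet? m r c = none := by
  induction m with
  | nil => rfl
  | cons e t ih =>
    obtain ⟨a, b, v⟩ := e
    rw [keysOf_cons] at h
    simp only [List.mem_cons, not_or] at h
    have hne : ¬(a = r ∧ b = c) := by
      rintro ⟨rfl, rfl⟩; exact h.1 rfl
    simp [dGet?, hne, ih h.2]

theorem dSet_append {m : List (Int × Int × Int)} {r c : Int} (v : Int)
    (h : (r, c) ∉ keysOf m) : dSet m r c v = m ++ [(r, c, v)] := by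
  induction m with
  | nil => rfl
  | cons e t ih =>
    obtain ⟨a, b, w⟩ := e
    rw [keysOf_cons] at h
    simp only [List.mem_cons, not_or] at h
    have hne : ¬(a = r ∧ b = c) := by
      rintro ⟨rfl, rfl⟩; exact h.1 rfl
    simp [dSet, hne, ih h.2]

theorem keysOf_dSet_of_mem {m : List (Int × Int × Int)} {r c : Int} (v : Int)
    (h : (r, c) ∈ keysOf m) : keysOf (dSet m r c v) = keysOf m := by
  induction m with
  | nil => cases h
  | cons e t ih =>
    obtain ⟨a, b, w⟩ := e
    by_cases hab : a = r ∧ b = c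
    · obtain ⟨rfl, rfl⟩ := hab
      simp [dSet, keysOf_cons]
    · rw [keysOf_cons] at h
      have hk : (r, c) ∈ keysOf t := by
        rcases List.mem_cons.mp h with heq | h'
        · exact absurd (by simpa [Prod.ext_iff] using heq.symm) hab
        · exact h'
      simp [dSet, hab, keysOf_cons, ih hk]

-- ---- evalV lemmas ----

theorem evalV_append (l₁ l₂ : List POp) (v : Int) :
    evalV v (l₁ ++ l₂) = evalV (evalV v l₁) l₂ := by
  induction l₁ generalizing v with
  | nil => rfl
  | cons o t ih => cases o <;> simp [evalV, ih]

theorem evalV_zero_cons (o : POp) (t : List POp) :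
    evalV 0 (o :: t) = evalV o.ival t := by
  cases o <;> simp [evalV, POp.ival]

theorem evalV_replicate_add (a b : Int) (n : Nat) (v : Int) :
    evalV v (List.replicate n (POp.add a b 1)) = v + n := by
  induction n generalizing v with
  | zero => simp [evalV]
  | succ k ih =>
    rw [List.replicate_succ]
    simp only [evalV, ih]
    push_cast; ring

theorem evalV_replicate_set (a b w : Int) (n : Nat) (v : Int) :
    evalV v (List.replicate n (POp.set a b w)) = if n = 0 then v else w := by
  induction n generalizing v with
  | zero => simp [evalV]
  | succ k ih =>
    rw [List.replicate_succ]
    simp only [evalV, ih]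
    cases k <;> simp

-- ---- opsFor lemmas ----

theorem opsFor_nil (k : Int × Int) : opsFor k [] = [] := rfl

theorem opsFor_cons_of_ne {o : POp} {k : Int × Int} (t : List POp) (h : o.key ≠ k) :
    opsFor k (o :: t) = opsFor k t := by
  simp [opsFor, h]

theorem opsFor_cons_self {o : POp} {k : Int × Int} (t : List POp) (h : o.key = k) :
    opsFor k (o :: t) = o :: opsFor k t := by
  simp [opsFor, h]

-- ---- updOcc lemmas ----

theorem updOcc_nil_ops (seen : List (Int × Int)) (m : List (Int × Int × Int)) :
    updOcc [] seen m = m := by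
  induction m generalizing seen with
  | nil => rfl
  | cons e t ih =>
    obtain ⟨a, b, v⟩ := e
    by_cases h : (a, b) ∈ seen <;> simp [updOcc, h, opsFor_nil, evalV, ih]

theorem updOcc_drop {o : POp} (t : List POp) (seen : List (Int × Int))
    (m : List (Int × Int × Int)) (h : o.key ∈ seen) :
    updOcc (o :: t) seen m = updOcc t seen m := by
  induction m generalizing seen with
  | nil => rfl
  | cons e t' ih =>
    obtain ⟨a, b, v⟩ := e
    by_cases hs : (a, b) ∈ seen
    · simp [updOcc, hs, ih seen h]
    · have hne : o.key ≠ (a, b) := fun he => hs (he ▸ h)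
      simp [updOcc, hs, opsFor_cons_of_ne _ hne, ih ((a, b) :: seen) (List.mem_cons_of_mem _ h)]

theorem updOcc_irrel {o : POp} (t : List POp) (seen : List (Int × Int))
    (m : List (Int × Int × Int)) (h : o.key ∉ keysOf m) :
    updOcc (o :: t) seen m = updOcc t seen m := by
  induction m generalizing seen with
  | nil => rfl
  | cons e t' ih =>
    obtain ⟨a, b, v⟩ := e
    rw [keysOf_cons] at h
    simp only [List.mem_cons, not_or] at h
    have hne : o.key ≠ (a, b) := h.1
    by_cases hs : (a, b) ∈ seen <;>
      simp [updOcc, hs, opsFor_cons_of_ne _ hne, ih _ h.2]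

-- how one op rewrites a cons cell
theorem app_cons_of_ne {a b : Int} (v : Int) (m : List (Int × Int × Int)) {o : POp}
    (h : o.key ≠ (a, b)) :
    POp.app ((a, b, v) :: m) o = (a, b, v) :: POp.app m o := by
  cases o with
  | add r c n =>
    have hne : ¬(a = r ∧ b = c) := by
      rintro ⟨rfl, rfl⟩; exact h rfl
    simp [POp.app, dSet, dGet?, hne]
  | set r c w =>
    have hne : ¬(a = r ∧ b = c) := by
      rintro ⟨rfl, rfl⟩; exact h rfl
    simp [POp.app, dSet, hne]

theorem updOcc_app_mem {o : POp} (t : List POp) :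
    ∀ (m : List (Int × Int × Int)) (seen : List (Int × Int)),
      o.key ∉ seen → o.key ∈ keysOf m →
      updOcc t seen (POp.app m o) = updOcc (o :: t) seen m := by
  intro m
  induction m with
  | nil => intro seen _ h; cases h
  | cons e m' ih =>
    intro seen hs hm
    obtain ⟨a, b, v⟩ := e
    by_cases hk : o.key = (a, b)
    · have hsab : (a, b) ∉ seen := hk ▸ hs
      have hmem : o.key ∈ (a, b) :: seen := by rw [hk]; exact List.mem_cons_self
      cases o with
      | add r c n =>
        obtain ⟨rfl, rfl⟩ : a = r ∧ b = c := by
          simpa [POp.key, Prod.ext_iff, eq_comm] using hk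
        have happ : POp.app ((a, b, v) :: m') (POp.add a b n) = (a, b, v + n) :: m' := by
          simp [POp.app, dGet?, dSet]
        rw [happ]
        simp only [updOcc, hsab, reduceIte]
        rw [opsFor_cons_self _ hk, updOcc_drop t ((a, b) :: seen) m' hmem]
        simp [evalV]
      | set r c w =>
        obtain ⟨rfl, rfl⟩ : a = r ∧ b = c := by
          simpa [POp.key, Prod.ext_iff, eq_comm] using hk
        have happ : POp.app ((a, b, v) :: m') (POp.set a b w) = (a, b, w) :: m' := by
          simp [POp.app, dSet]
        rw [happ]
        simp only [updOcc, hsab, reduceIte]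
        rw [opsFor_cons_self _ hk, updOcc_drop t ((a, b) :: seen) m' hmem]
        simp [evalV]
    · have hm' : o.key ∈ keysOf m' := by
        rw [keysOf_cons] at hm
        rcases List.mem_cons.mp hm with heq | h'
        · exact absurd heq hk
        · exact h'
      rw [app_cons_of_ne v m' hk]
      by_cases hsab : (a, b) ∈ seen
      · simp only [updOcc, hsab, if_pos]
        rw [ih seen hs hm']
      · have hs' : o.key ∉ (a, b) :: seen := by
          simp only [List.mem_cons, not_or]; exact ⟨hk, hs⟩
        simp only [updOcc, hsab, reduceIte]
        rw [opsFor_cons_of_ne _ hk, ih ((a, b) :: seen) hs' hm']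

theorem updOcc_append_new (ops : List POp) (k : Int × Int) (w : Int) :
    ∀ (m : List (Int × Int × Int)) (seen : List (Int × Int)),
      k ∉ keysOf m → k ∉ seen →
      updOcc ops seen (m ++ [(k.1, k.2, w)]) =
        updOcc ops seen m ++ [(k.1, k.2, evalV w (opsFor k ops))] := by
  intro m
  induction m with
  | nil =>
    intro seen _ hs
    have : (k.1, k.2) ∉ seen := by
      intro h; exact hs (by simpa using h)
    simp [updOcc, this]
  | cons e m' ih =>
    intro seen hm hs
    obtain ⟨a, b, v⟩ := e
    rw [keysOf_cons] at hm
    simp only [List.mem_cons, not_or] at hm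
    by_cases hsab : (a, b) ∈ seen
    · simp [updOcc, hsab, ih seen hm.2 hs]
    · have hs' : k ∉ (a, b) :: seen := by
        simp only [List.mem_cons, not_or]; exact ⟨hm.1, hs⟩
      simp [updOcc, hsab, ih ((a, b) :: seen) hm.2 hs']

theorem updOcc_congr {ops₁ ops₂ : List POp}
    (h : ∀ (k : Int × Int) (v : Int), evalV v (opsFor k ops₁) = evalV v (opsFor k ops₂)) :
    ∀ (m : List (Int × Int × Int)) (seen : List (Int × Int)),
      updOcc ops₁ seen m = updOcc ops₂ seen m := by
  intro m
  induction m with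
  | nil => intro seen; rfl
  | cons e m' ih =>
    intro seen
    obtain ⟨a, b, v⟩ := e
    by_cases hsab : (a, b) ∈ seen <;> simp [updOcc, hsab, h (a, b) v, ih]

-- ---- newKeys lemmas ----

theorem newKeys_congr : ∀ (l ks₁ ks₂ : List (Int × Int)),
    (∀ x, x ∈ ks₁ ↔ x ∈ ks₂) → newKeys ks₁ l = newKeys ks₂ l := by
  intro l
  induction l with
  | nil => intro _ _ _; rfl
  | cons k t ih =>
    intro ks₁ ks₂ h
    by_cases hk : k ∈ ks₁
    · simp [newKeys, hk, (h k).mp hk, ih ks₁ ks₂ h]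
    · have hk₂ : k ∉ ks₂ := fun hc => hk ((h k).mpr hc)
      simp only [newKeys]
      rw [if_neg hk, if_neg hk₂, ih (k :: ks₁) (k :: ks₂) (by intro x; simp [h x])]

theorem newKeys_skip : ∀ (l : List (Int × Int)) (ks rest : List (Int × Int)),
    (∀ x ∈ l, x ∈ ks) → newKeys ks (l ++ rest) = newKeys ks rest := by
  intro l
  induction l with
  | nil => intro _ _ _; rfl
  | cons k t ih =>
    intro ks rest h
    have hk : k ∈ ks := h k List.mem_cons_self
    simp only [List.cons_append, newKeys, hk, if_pos]
    exact ih ks rest (fun x hx => h x (List.mem_cons_of_mem _ hx))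

theorem mem_newKeys : ∀ (l ks : List (Int × Int)) (k : Int × Int),
    k ∈ newKeys ks l → k ∈ l ∧ k ∉ ks := by
  intro l
  induction l with
  | nil => intro ks k h; cases h
  | cons k' t ih =>
    intro ks k h
    by_cases hk' : k' ∈ ks
    · simp only [newKeys, hk', if_pos] at h
      obtain ⟨h1, h2⟩ := ih ks k h
      exact ⟨List.mem_cons_of_mem _ h1, h2⟩
    · simp only [newKeys, hk'] at h
      rcases List.mem_cons.mp h with rfl | h
      · exact ⟨List.mem_cons_self, hk'⟩
      · obtain ⟨h1, h2⟩ := ih (k' :: ks) k h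
        have h2' : k ∉ ks := fun hc => h2 (List.mem_cons_of_mem _ hc)
        exact ⟨List.mem_cons_of_mem _ h1, h2'⟩

-- ---- the characterization ----

theorem app_not_mem {o : POp} {m : List (Int × Int × Int)} (h : o.key ∉ keysOf m) :
    POp.app m o = m ++ [(o.key.1, o.key.2, o.ival)] := by
  cases o with
  | add r c n =>
    have h' : (r, c) ∉ keysOf m := h
    rw [POp.app, dGet?_eq_none h', dSet_append _ h']
    simp [POp.key, POp.ival]
  | set r c w =>
    have h' : (r, c) ∉ keysOf m := h
    rw [POp.app, dSet_append _ h']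
    simp [POp.key, POp.ival]

theorem keysOf_app_of_mem {o : POp} {m : List (Int × Int × Int)} (h : o.key ∈ keysOf m) :
    keysOf (POp.app m o) = keysOf m := by
  cases o with
  | add r c n => exact keysOf_dSet_of_mem _ h
  | set r c w => exact keysOf_dSet_of_mem _ h

theorem pApply_char : ∀ (ops : List POp) (m : List (Int × Int × Int)),
    pApply ops m = applyChar ops m := by
  intro ops
  induction ops with
  | nil =>
    intro m
    simp [pApply, applyChar, updOcc_nil_ops, newKeys]
  | cons o t ih =>
    intro m
    have hstep : pApply (o :: t) m = pApply t (POp.app m o) := rfl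
    rw [hstep, ih (POp.app m o)]
    by_cases hk : o.key ∈ keysOf m
    · unfold applyChar
      rw [keysOf_app_of_mem hk,
        updOcc_app_mem t m [] (List.not_mem_nil) hk]
      have hnk : newKeys (keysOf m) ((o :: t).map POp.key) =
          newKeys (keysOf m) (t.map POp.key) := by
        simp [newKeys, hk]
      rw [hnk]
      refine congrArg _ ?_
      apply List.map_congr_left
      intro k hkk
      have hne : o.key ≠ k := by
        intro he
        exact (mem_newKeys _ _ _ hkk).2 (he ▸ hk)
      rw [opsFor_cons_of_ne _ hne]
    · rw [app_not_mem hk]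
      unfold applyChar
      rw [updOcc_append_new t o.key o.ival m [] hk (List.not_mem_nil),
        updOcc_irrel t [] m hk, keysOf_append]
      have hkeys : keysOf [(o.key.1, o.key.2, o.ival)] = [o.key] := by
        simp [keysOf]
      rw [hkeys]
      have hnk₂ : newKeys (keysOf m ++ [o.key]) (t.map POp.key) =
          newKeys (o.key :: keysOf m) (t.map POp.key) := by
        apply newKeys_congr
        intro x; simp [or_comm]
      have hnk : newKeys (keysOf m) ((o :: t).map POp.key) =
          o.key :: newKeys (o.key :: keysOf m) (t.map POp.key) := by
        simp [newKeys, hk]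
      rw [hnk₂, hnk]
      simp only [List.map_cons]
      rw [List.append_assoc]
      refine congrArg _ ?_
      simp only [List.singleton_append, List.cons.injEq]
      constructor
      · rw [opsFor_cons_self _ rfl, evalV_zero_cons]
      · apply List.map_congr_left
        intro k hkk
        have hne : o.key ≠ k := by
          intro he
          exact (mem_newKeys _ _ _ hkk).2 (he ▸ List.mem_cons_self)
        rw [opsFor_cons_of_ne _ hne]


-- ---- pApply plumbing ----

theorem pApply_append (l₁ l₂ : List POp) (m : List (Int × Int × Int)) :
    pApply (l₁ ++ l₂) m = pApply l₂ (pApply l₁ m) := List.foldl_append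

theorem pApply_flatMap {α : Type} (l : List α) (f : α → List POp) :
    ∀ (m : List (Int × Int × Int)),
      pApply (l.flatMap f) m = l.foldl (fun m x => pApply (f x) m) m := by
  induction l with
  | nil => intro m; rfl
  | cons x t ih =>
    intro m
    rw [List.flatMap_cons, pApply_append, List.foldl_cons, ih]

theorem pApply_map {α : Type} (l : List α) (g : α → POp) (m : List (Int × Int × Int)) :
    pApply (l.map g) m = l.foldl (fun m x => POp.app m (g x)) m := List.foldl_map

-- ---- the op stream of A ----

def opA (idx : List Int) (i j : Int) : POp :=
  if i = j then POp.set (PySem.List.pyGetD idx i 0) (PySem.List.pyGetD idx j 0) 1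
  else POp.add (PySem.List.pyGetD idx i 0) (PySem.List.pyGetD idx j 0) 1

def opsA (idx : List Int) : List POp :=
  (PySem.List.pyRange 0 (idx.length : Int) 1).flatMap (fun i =>
    (PySem.List.pyRange 0 (idx.length : Int) 1).map (fun j => opA idx i j))

theorem key_opA (idx : List Int) (i j : Int) :
    (opA idx i j).key = (PySem.List.pyGetD idx i 0, PySem.List.pyGetD idx j 0) := by
  unfold opA; split <;> rfl

theorem cb_eq_pApply (idx : List Int) (matrix : List (Int × Int × Int)) :
    cb idx matrix = pApply (opsA idx) matrix := by
  unfold cb opsA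
  rw [pApply_flatMap]
  apply PySem.List.foldl_congr_mem
  intro m i _
  rw [pApply_map]
  apply PySem.List.foldl_congr_mem
  intro m' j _
  by_cases hij : i = j
  · simp [opA, hij, POp.app]
  · simp [opA, hij, POp.app]

-- positions (as Int indices) of value x in idx
def P (idx : List Int) (x : Int) : List Int :=
  (PySem.List.pyRange 0 (idx.length : Int) 1).filter
    (fun i => decide (PySem.List.pyGetD idx i 0 = x))

theorem mem_P {idx : List Int} {x i : Int} (h : i ∈ P idx x) :
    PySem.List.pyGetD idx i 0 = x := by
  have := (List.mem_filter.mp h).2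
  simpa using this

theorem flatMap_filter_aux {α β : Type} (q : α → Bool) (h : α → List β) :
    ∀ (l : List α), (∀ x ∈ l, q x = false → h x = []) →
      l.flatMap h = (l.filter q).flatMap h := by
  intro l
  induction l with
  | nil => intro _; rfl
  | cons x t ih =>
    intro hyp
    rw [List.flatMap_cons, List.filter_cons]
    cases hq : q x with
    | true =>
      simp only [if_pos]
      rw [List.flatMap_cons, ih (fun y hy => hyp y (List.mem_cons_of_mem _ hy))]
    | false =>
      simp only [Bool.false_eq_true, if_neg, not_false_iff]
      rw [hyp x List.mem_cons_self hq, List.nil_append,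
        ih (fun y hy => hyp y (List.mem_cons_of_mem _ hy))]

theorem opsFor_opsA (idx : List Int) (a b : Int) :
    opsFor (a, b) (opsA idx) =
      (P idx a).flatMap (fun i => (P idx b).map
        (fun j => if i = j then POp.set a b 1 else POp.add a b 1)) := by
  unfold opsFor opsA
  rw [List.filter_flatMap]
  have hinner : ∀ i : Int,
      ((PySem.List.pyRange 0 (idx.length : Int) 1).map (fun j => opA idx i j)).filter
          (fun o => decide (o.key = (a, b))) =
        if PySem.List.pyGetD idx i 0 = a then
          (P idx b).map (fun j => opA idx i j)
        else [] := by
    intro i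
    rw [List.filter_map]
    by_cases hi : PySem.List.pyGetD idx i 0 = a
    · rw [if_pos hi]
      refine congrArg _ ?_
      unfold P
      apply List.filter_congr
      intro j _
      simp [Function.comp, key_opA, Prod.ext_iff, hi]
    · rw [if_neg hi]
      have : ((PySem.List.pyRange 0 (idx.length : Int) 1).filter
          ((fun o => decide (o.key = (a, b))) ∘ fun j => opA idx i j)) = [] := by
        rw [List.filter_eq_nil_iff]
        intro j _
        simp [Function.comp, key_opA, Prod.ext_iff]
        intro h; exact absurd h hi
      rw [this, List.map_nil]
  calc (PySem.List.pyRange 0 (idx.length : Int) 1).flatMap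
        (fun i => ((PySem.List.pyRange 0 (idx.length : Int) 1).map
          (fun j => opA idx i j)).filter (fun o => decide (o.key = (a, b))))
      = (P idx a).flatMap (fun i =>
          ((PySem.List.pyRange 0 (idx.length : Int) 1).map
            (fun j => opA idx i j)).filter (fun o => decide (o.key = (a, b)))) := by
        apply flatMap_filter_aux (fun i => decide (PySem.List.pyGetD idx i 0 = a))
        intro i _ hq
        rw [hinner i, if_neg (by simpa using hq)]
    _ = (P idx a).flatMap (fun i => (P idx b).map
          (fun j => if i = j then POp.set a b 1 else POp.add a b 1)) := by
        apply List.flatMap_congr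
        intro i hi
        have hia := mem_P hi
        rw [hinner i, if_pos hia]
        apply List.map_congr_left
        intro j hj
        have hjb := mem_P hj
        unfold opA
        rw [hia, hjb]

-- ---- counting positions ----

theorem count_range_getD : ∀ (l : List Int) (x : Int),
    ((List.range l.length).filter (fun k => decide (l.getD k 0 = x))).length = l.count x := by
  intro l
  induction l with
  | nil => intro x; simp
  | cons h t ih =>
    intro x
    have hpred : List.filter ((fun k => decide ((h :: t).getD k 0 = x)) ∘ Nat.succ)
        (List.range t.length) =
        List.filter (fun k => decide (t.getD k 0 = x)) (List.range t.length) := by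
      apply List.filter_congr
      intro k _
      simp [Function.comp]
    rw [List.length_cons, List.range_succ_eq_map, List.filter_cons]
    by_cases hx : h = x
    · rw [if_pos (by simp [hx]), List.length_cons, List.filter_map, List.length_map,
        hpred, ih x]
      simp [hx]
    · rw [if_neg (by simp [hx]), List.filter_map, List.length_map, hpred, ih x]
      simp [hx]

theorem length_P (idx : List Int) (x : Int) : (P idx x).length = idx.count x := by
  unfold P
  rw [PySem.List.pyRange_one]
  have h1 : ((0 : Int) - 0).toNat = 0 := rfl
  rw [List.filter_map]
  rw [List.length_map]
  have : ((fun i => decide (PySem.List.pyGetD idx i 0 = x)) ∘ fun k : Nat => (0 : Int) + ↑k)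
      = fun k : Nat => decide (idx.getD k 0 = x) := by
    funext k
    simp [PySem.List.pyGetD_natCast]
  rw [show ((idx.length : Int) - 0).toNat = idx.length by simp, this, count_range_getD]

theorem P_nil_of_not_mem {idx : List Int} {x : Int} (h : x ∉ idx) : P idx x = [] := by
  rw [← List.length_eq_zero_iff, length_P]
  exact List.count_eq_zero_of_not_mem h

-- ---- A-side per-key evaluation ----

theorem evalV_flatMap_const_replicate (a b : Int) (nb : Nat) :
    ∀ (l : List Int) (v : Int),
      evalV v (l.flatMap (fun _ => List.replicate nb (POp.add a b 1))) =
        v + (l.length : Int) * (nb : Int) := by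
  intro l
  induction l with
  | nil => intro v; simp [evalV]
  | cons y t ih =>
    intro v
    rw [List.flatMap_cons, evalV_append, evalV_replicate_add, ih, List.length_cons]
    push_cast; ring

theorem evalA_offdiag (idx : List Int) {a b : Int} (h : a ≠ b) (v : Int) :
    evalV v (opsFor (a, b) (opsA idx)) =
      v + (idx.count a : Int) * (idx.count b : Int) := by
  rw [opsFor_opsA]
  have hmap : ∀ i ∈ P idx a,
      (P idx b).map (fun j => if i = j then POp.set a b 1 else POp.add a b 1) =
        List.replicate (idx.count b) (POp.add a b 1) := by
    intro i hi
    have hia := mem_P hi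
    rw [show (P idx b).map (fun j => if i = j then POp.set a b 1 else POp.add a b 1) =
        (P idx b).map (fun _ => POp.add a b 1) from ?_, List.map_const', length_P]
    apply List.map_congr_left
    intro j hj
    have hjb := mem_P hj
    have hij : i ≠ j := by
      intro he; apply h; rw [← hia, ← hjb, he]
    rw [if_neg hij]
  rw [List.flatMap_congr hmap, evalV_flatMap_const_replicate, length_P]

theorem evalA_diag (idx : List Int) (a v : Int) :
    evalV v (opsFor (a, a) (opsA idx)) = if a ∈ idx then 1 else v := by
  rw [opsFor_opsA]
  by_cases hmem : a ∈ idx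
  · rw [if_pos hmem]
    have hne : P idx a ≠ [] := by
      intro hnil
      have hlen := length_P idx a
      rw [hnil, List.length_nil] at hlen
      have hpos := List.count_pos_iff.mpr hmem
      omega
    rcases (List.eq_nil_or_concat (P idx a)) with hnil | ⟨q, L, hqL⟩
    · exact absurd hnil hne
    · rw [hqL, List.concat_eq_append, List.flatMap_append, List.flatMap_singleton,
        List.map_append, List.map_singleton, if_pos rfl, evalV_append, evalV_append]
      simp [evalV]
  · rw [if_neg hmem, P_nil_of_not_mem hmem, List.flatMap_nil]
    rfl


-- ---- the op stream of B ----

-- Counter(idx).items() : distinct values in first-occurrence order, with their counts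
def itemsC (idx : List Int) : List (Int × Int) :=
  (PySem.Set.ofList idx).map (fun k => (k, (idx.count k : Int)))

def opsB (idx : List Int) : List POp :=
  ((itemsC idx).flatMap (fun rn =>
    ((itemsC idx).filter (fun cn => decide (rn.1 ≠ cn.1))).map
      (fun cn => POp.add rn.1 cn.1 (rn.2 * cn.2))))
  ++ idx.map (fun v => POp.set v v 1)

theorem cb_alt_eq_pApply (idx : List Int) (matrix : List (Int × Int × Int)) :
    cb_alt idx matrix = pApply (opsB idx) matrix := by
  simp only [cb_alt]
  rw [PySem.Dict.foldl_insert_getD_add_one_eq_counter, PySem.Dict.items_counter]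
  have hinner : ∀ (rn : Int × Int) (m : List (Int × Int × Int)),
      (itemsC idx).foldl (fun m cn =>
          if rn.1 ≠ cn.1 then
            dSet m rn.1 cn.1 ((dGet? m rn.1 cn.1).getD 0 + rn.2 * cn.2)
          else m) m =
        pApply (((itemsC idx).filter (fun cn => decide (rn.1 ≠ cn.1))).map
          (fun cn => POp.add rn.1 cn.1 (rn.2 * cn.2))) m := by
    intro rn m
    rw [pApply_map, List.foldl_filter]
    apply PySem.List.foldl_congr_mem
    intro acc cn _
    by_cases h : rn.1 = cn.1
    · simp [h]
    · simp [h, POp.app]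
  have houter :
      (itemsC idx).foldl (fun m rn =>
          (itemsC idx).foldl (fun m cn =>
            if rn.1 ≠ cn.1 then
              dSet m rn.1 cn.1 ((dGet? m rn.1 cn.1).getD 0 + rn.2 * cn.2)
            else m) m) matrix =
        pApply ((itemsC idx).flatMap (fun rn =>
          ((itemsC idx).filter (fun cn => decide (rn.1 ≠ cn.1))).map
            (fun cn => POp.add rn.1 cn.1 (rn.2 * cn.2)))) matrix := by
    rw [pApply_flatMap]
    apply PySem.List.foldl_congr_mem
    intro m rn _
    exact hinner rn m
  rw [show (PySem.Set.ofList idx).map (fun k => (k, (List.count k idx : Int))) = itemsC idx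
      from rfl, houter, opsB, pApply_append, pApply_map]
  rfl

-- ---- B-side per-key evaluation ----

theorem filter_itemsC_eq (idx : List Int) (a : Int) :
    (itemsC idx).filter (fun rn => decide (rn.1 = a)) =
      if a ∈ idx then [(a, (idx.count a : Int))] else [] := by
  unfold itemsC
  rw [List.filter_map]
  have hc : ((fun rn : Int × Int => decide (rn.1 = a)) ∘ fun k => (k, (idx.count k : Int)))
      = fun x => decide (x = a) := by
    funext k; simp [Function.comp]
  rw [hc, List.filter_eq]
  by_cases hmem : a ∈ idx
  · have h1 : List.count a (PySem.Set.ofList idx) = 1 :=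
      List.count_eq_one_of_mem (PySem.Set.nodup_ofList idx)
        ((PySem.Set.mem_ofList idx a).mpr hmem)
    rw [h1, if_pos hmem]
    rfl
  · have h0 : List.count a (PySem.Set.ofList idx) = 0 :=
      List.count_eq_zero_of_not_mem (fun hc => hmem ((PySem.Set.mem_ofList idx a).mp hc))
    rw [h0, if_neg hmem]
    rfl

theorem part2_opsB (idx : List Int) (a b : Int) :
    (idx.map (fun v => POp.set v v 1)).filter (fun o => decide (o.key = (a, b))) =
      if a = b then List.replicate (idx.count a) (POp.set a a 1) else [] := by
  rw [List.filter_map]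
  by_cases hab : a = b
  · subst hab
    rw [if_pos rfl]
    have hc : ((fun o : POp => decide (o.key = (a, a))) ∘ fun v => POp.set v v 1)
        = fun v => decide (v = a) := by
      funext v; simp [Function.comp, POp.key, Prod.ext_iff, and_self]
    rw [hc, List.filter_eq, List.map_replicate]
  · rw [if_neg hab]
    have hnil : (idx.filter
        ((fun o : POp => decide (o.key = (a, b))) ∘ fun v => POp.set v v 1)) = [] := by
      rw [List.filter_eq_nil_iff]
      intro v _
      simp only [Function.comp, POp.key, decide_eq_true_eq, Prod.mk.injEq, not_and]
      intro h1 h2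
      exact hab (h1 ▸ h2 ▸ rfl)
    rw [hnil, List.map_nil]

theorem part1_opsB_diag (idx : List Int) (a : Int) :
    ((itemsC idx).flatMap (fun rn =>
      ((itemsC idx).filter (fun cn => decide (rn.1 ≠ cn.1))).map
        (fun cn => POp.add rn.1 cn.1 (rn.2 * cn.2)))).filter
          (fun o => decide (o.key = (a, a))) = [] := by
  rw [List.filter_flatMap, List.flatMap_eq_nil_iff]
  intro rn _
  rw [List.filter_map]
  have hnil : (((itemsC idx).filter (fun cn => decide (rn.1 ≠ cn.1))).filter
      ((fun o : POp => decide (o.key = (a, a))) ∘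
        fun cn => POp.add rn.1 cn.1 (rn.2 * cn.2))) = [] := by
    rw [List.filter_filter, List.filter_eq_nil_iff]
    intro cn _
    by_cases h : rn.1 = cn.1
    · simp [Function.comp, POp.key, h]
    · simp only [Function.comp, POp.key, Bool.and_eq_true, decide_eq_true_eq,
        Prod.mk.injEq, not_and, ne_eq]
      intro hc _
      exact absurd (hc.1.trans hc.2.symm) h
  rw [hnil, List.map_nil]

theorem evalB_diag (idx : List Int) (a v : Int) :
    evalV v (opsFor (a, a) (opsB idx)) = if a ∈ idx then 1 else v := by
  unfold opsB opsFor
  rw [List.filter_append, part1_opsB_diag idx a, part2_opsB idx a a, if_pos rfl,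
    List.nil_append, evalV_replicate_set]
  by_cases hmem : a ∈ idx
  · rw [if_pos hmem, if_neg (by have := List.count_pos_iff.mpr hmem; omega)]
  · rw [if_neg hmem, if_pos (List.count_eq_zero_of_not_mem hmem)]

theorem evalB_offdiag (idx : List Int) {a b : Int} (h : a ≠ b) (v : Int) :
    evalV v (opsFor (a, b) (opsB idx)) =
      v + (idx.count a : Int) * (idx.count b : Int) := by
  unfold opsB opsFor
  rw [List.filter_append, part2_opsB idx a b, if_neg h, List.append_nil,
    List.filter_flatMap]
  have hblock : ∀ rn : Int × Int,
      (((itemsC idx).filter (fun cn => decide (rn.1 ≠ cn.1))).map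
        (fun cn => POp.add rn.1 cn.1 (rn.2 * cn.2))).filter
          (fun o => decide (o.key = (a, b))) =
      (((itemsC idx).filter (fun cn => decide (rn.1 ≠ cn.1))).filter
        (fun cn => decide (rn.1 = a) && decide (cn.1 = b))).map
          (fun cn => POp.add rn.1 cn.1 (rn.2 * cn.2)) := by
    intro rn
    rw [List.filter_map]
    refine congrArg _ (List.filter_congr ?_)
    intro cn _
    simp [Function.comp, POp.key, Prod.ext_iff]
  have hrestrict :
      (itemsC idx).flatMap (fun rn =>
        (((itemsC idx).filter (fun cn => decide (rn.1 ≠ cn.1))).map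
          (fun cn => POp.add rn.1 cn.1 (rn.2 * cn.2))).filter
            (fun o => decide (o.key = (a, b)))) =
      ((itemsC idx).filter (fun rn => decide (rn.1 = a))).flatMap (fun rn =>
        (((itemsC idx).filter (fun cn => decide (rn.1 ≠ cn.1))).map
          (fun cn => POp.add rn.1 cn.1 (rn.2 * cn.2))).filter
            (fun o => decide (o.key = (a, b)))) := by
    apply flatMap_filter_aux
    intro rn _ hq
    rw [hblock rn]
    have hnil : (((itemsC idx).filter (fun cn => decide (rn.1 ≠ cn.1))).filter
        (fun cn => decide (rn.1 = a) && decide (cn.1 = b))) = [] := by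
      rw [List.filter_eq_nil_iff]
      intro cn _
      simp only [Bool.and_eq_true, decide_eq_true_eq, not_and]
      intro h1
      exact absurd h1 (by simpa using hq)
    rw [hnil, List.map_nil]
  rw [hrestrict, filter_itemsC_eq idx a]
  by_cases hma : a ∈ idx
  · rw [if_pos hma, List.flatMap_singleton, hblock ((a, (idx.count a : Int)))]
    have hfil : (((itemsC idx).filter
          (fun cn => decide ((a, (idx.count a : Int)).1 ≠ cn.1))).filter
        (fun cn => decide ((a, (idx.count a : Int)).1 = a) && decide (cn.1 = b))) =
        (itemsC idx).filter (fun cn => decide (cn.1 = b)) := by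
      rw [List.filter_filter]
      apply List.filter_congr
      intro cn _
      by_cases hcb : cn.1 = b
      · simp [hcb, h]
      · simp [hcb]
    rw [hfil, filter_itemsC_eq idx b]
    by_cases hmb : b ∈ idx
    · rw [if_pos hmb, List.map_singleton]
      simp [evalV]
    · rw [if_neg hmb, List.map_nil]
      rw [List.count_eq_zero_of_not_mem hmb]
      simp [evalV]
  · rw [if_neg hma, List.flatMap_nil, List.count_eq_zero_of_not_mem hma]
    simp [evalV]

theorem evalKey_eq (idx : List Int) : ∀ (k : Int × Int) (v : Int),
    evalV v (opsFor k (opsA idx)) = evalV v (opsFor k (opsB idx)) := by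
  rintro ⟨a, b⟩ v
  by_cases hab : a = b
  · subst hab
    rw [evalA_diag, evalB_diag]
  · rw [evalA_offdiag idx hab, evalB_offdiag idx hab]

-- ---- the key streams ----

theorem keysA_eq (idx : List Int) :
    (opsA idx).map POp.key = idx.flatMap (fun x => idx.map (fun y => (x, y))) := by
  unfold opsA
  rw [List.map_flatMap]
  have hinner : ∀ i : Int,
      ((PySem.List.pyRange 0 (idx.length : Int) 1).map (fun j => opA idx i j)).map POp.key =
        idx.map (fun y => (PySem.List.pyGetD idx i 0, y)) := by
    intro i
    rw [List.map_map]
    have hc : (POp.key ∘ fun j => opA idx i j)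
        = (fun y => (PySem.List.pyGetD idx i 0, y)) ∘ (fun j => PySem.List.pyGetD idx j 0) := by
      funext j; simp [Function.comp, key_opA]
    rw [hc, ← List.map_map, PySem.List.map_pyGetD_pyRange_zero']
  rw [List.flatMap_congr (fun i _ => hinner i)]
  have h2 : ((PySem.List.pyRange 0 (idx.length : Int) 1).map
        (fun i => PySem.List.pyGetD idx i 0)).flatMap (fun x => idx.map (fun y => (x, y)))
      = (PySem.List.pyRange 0 (idx.length : Int) 1).flatMap
          (fun i => idx.map (fun y => (PySem.List.pyGetD idx i 0, y))) :=
    List.flatMap_map _ _ _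
  rw [PySem.List.map_pyGetD_pyRange_zero'] at h2
  exact h2.symm

theorem keysB_eq (idx : List Int) :
    (opsB idx).map POp.key =
      ((itemsC idx).flatMap (fun rn =>
        ((itemsC idx).filter (fun cn => decide (rn.1 ≠ cn.1))).map
          (fun cn => (rn.1, cn.1))))
      ++ idx.map (fun v => (v, v)) := by
  unfold opsB
  rw [List.map_append, List.map_flatMap]
  congr 1
  · apply List.flatMap_congr
    intro rn _
    rw [List.map_map]
    rfl
  · rw [List.map_map]
    rfl

-- ---- newKeys computations ----

theorem newKeys_block (d : Int × Int) :
    ∀ (l : List (Int × Int)) (ks rest : List (Int × Int)),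
      (∀ k ∈ l, k = d ∨ k ∈ ks) → d ∈ l →
      newKeys ks (l ++ rest) =
        if d ∈ ks then newKeys ks rest else d :: newKeys (d :: ks) rest := by
  intro l
  induction l with
  | nil => intro ks rest _ hd; cases hd
  | cons k t ih =>
    intro ks rest hall hd
    rw [List.cons_append]
    by_cases hks : k ∈ ks
    · rw [show newKeys ks (k :: (t ++ rest)) = newKeys ks (t ++ rest) by
        simp [newKeys, hks]]
      by_cases hdt : d ∈ t
      · exact ih ks rest (fun x hx => hall x (List.mem_cons_of_mem _ hx)) hdt
      · have hdk : d = k := by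
          rcases List.mem_cons.mp hd with h | h
          · exact h
          · exact absurd h hdt
        rw [if_pos (hdk ▸ hks)]
        apply newKeys_skip
        intro x hx
        rcases hall x (List.mem_cons_of_mem _ hx) with rfl | h
        · exact hdk ▸ hks
        · exact h
    · have hkd : k = d := by
        rcases hall k List.mem_cons_self with h | h
        · exact h
        · exact absurd h hks
      subst hkd
      rw [show newKeys ks (k :: (t ++ rest)) = k :: newKeys (k :: ks) (t ++ rest) by
        simp [newKeys, hks], if_neg hks]
      refine congrArg _ ?_
      apply newKeys_skip
      intro x hx
      rcases hall x (List.mem_cons_of_mem _ hx) with rfl | h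
      · exact List.mem_cons_self
      · exact List.mem_cons_of_mem _ h

theorem newKeys_A (idx : List Int) :
    ∀ (pre : List Int) (ks : List (Int × Int)),
      (∀ x ∈ pre, x ∈ idx) →
      (∀ x ∈ pre, ∀ y ∈ idx, x ≠ y → (x, y) ∈ ks) →
      newKeys ks (pre.flatMap (fun x => idx.map (fun y => (x, y)))) =
        newKeys ks (pre.map (fun v => (v, v))) := by
  intro pre
  induction pre with
  | nil => intro ks _ _; rfl
  | cons x t ih =>
    intro ks hsub hks
    rw [List.flatMap_cons, List.map_cons]
    have hall : ∀ k ∈ idx.map (fun y => (x, y)), k = (x, x) ∨ k ∈ ks := by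
      intro k hk
      obtain ⟨y, hy, rfl⟩ := List.mem_map.mp hk
      by_cases hxy : x = y
      · left; rw [hxy]
      · right; exact hks x List.mem_cons_self y hy hxy
    have hd : (x, x) ∈ idx.map (fun y => (x, y)) :=
      List.mem_map.mpr ⟨x, hsub x List.mem_cons_self, rfl⟩
    rw [newKeys_block (x, x) _ ks _ hall hd]
    by_cases hxx : (x, x) ∈ ks
    · rw [if_pos hxx, show newKeys ks ((x, x) :: t.map (fun v => (v, v))) =
          newKeys ks (t.map (fun v => (v, v))) by simp [newKeys, hxx]]
      exact ih ks (fun z hz => hsub z (List.mem_cons_of_mem _ hz))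
        (fun z hz y hy hne => hks z (List.mem_cons_of_mem _ hz) y hy hne)
    · rw [if_neg hxx, show newKeys ks ((x, x) :: t.map (fun v => (v, v))) =
          (x, x) :: newKeys ((x, x) :: ks) (t.map (fun v => (v, v))) by simp [newKeys, hxx]]
      refine congrArg _ ?_
      exact ih ((x, x) :: ks) (fun z hz => hsub z (List.mem_cons_of_mem _ hz))
        (fun z hz y hy hne =>
          List.mem_cons_of_mem _ (hks z (List.mem_cons_of_mem _ hz) y hy hne))

-- ===== VERDICT (by name: the statement is the Claim_ definition above) =====
theorem cb_spec : Claim_equal_cb := by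
  intro idx matrix _hdom hpre
  show cb idx matrix = cb_alt idx matrix
  rw [cb_eq_pApply, cb_alt_eq_pApply, pApply_char, pApply_char]
  unfold applyChar
  have hkeysPre : ∀ x ∈ idx, ∀ y ∈ idx, x ≠ y → (x, y) ∈ keysOf matrix := by
    intro x hx y hy hne
    exact hpre x hx y hy hne
  have hA : newKeys (keysOf matrix) ((opsA idx).map POp.key) =
      newKeys (keysOf matrix) (idx.map (fun v => (v, v))) := by
    rw [keysA_eq]
    exact newKeys_A idx idx (keysOf matrix) (fun z hz => hz) hkeysPre
  have hB : newKeys (keysOf matrix) ((opsB idx).map POp.key) =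
      newKeys (keysOf matrix) (idx.map (fun v => (v, v))) := by
    rw [keysB_eq]
    apply newKeys_skip
    intro p hp
    obtain ⟨rn, hrn, hp2⟩ := List.mem_flatMap.mp hp
    obtain ⟨cn, hcn, rfl⟩ := List.mem_map.mp hp2
    obtain ⟨hcn1, hcn2⟩ := List.mem_filter.mp hcn
    obtain ⟨r0, hr0, rfl⟩ := List.mem_map.mp hrn
    obtain ⟨c0, hc0, rfl⟩ := List.mem_map.mp hcn1
    exact hkeysPre _ ((PySem.Set.mem_ofList idx _).mp hr0) _
      ((PySem.Set.mem_ofList idx _).mp hc0) (by simpa using hcn2)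
  rw [hA, hB, updOcc_congr (evalKey_eq idx) matrix []]
  refine congrArg _ ?_
  apply List.map_congr_left
  intro k _
  rw [evalKey_eq idx k 0]
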